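-- pv_equiv track=rewrite | github.com/ohenrib-jpg/GEOPOL | security_governance/ucdp_connector.py | _count_conflicts_by_region
-- ===== SOURCE A (Python) =====
-- from typing import List, Dict, Any, Optional
--
-- def _count_conflicts_by_region(conflicts: List[Dict]) -> Dict[str, int]:
--     """Compte les conflits par région"""
--     region_mapping = {
--         'Africa': ['Sub-Saharan Africa', 'North Africa'],
--         'Asia': ['South Asia', 'Southeast Asia', 'East Asia', 'Central Asia'],
--         'Middle East': ['Middle East'],
--         'Europe': ['Europe'],
--         'Americas': ['North America', 'South America', 'Central America']
--     }
--
--     counts = {region: 0 for region in region_mapping.keys()}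
--
--     for conflict in conflicts:
--         region_name = conflict.get('region', '')
--         for region, subregions in region_mapping.items():
--             if region_name in subregions:
--                 counts[region] += 1
--                 break
--         else:
--             counts['Other'] = counts.get('Other', 0) + 1
--
--     return counts
-- ===== SOURCE B (Python) =====
-- from typing import List, Dict, Any, Optional
--
-- def _count_conflicts_by_region(conflicts: List[Dict]) -> Dict[str, int]:
--     """Compte les conflits par region (staged: label pass, then per-region counting pass)."""
--     region_mapping = {
--         'Africa': ['Sub-Saharan Africa', 'North Africa'],
--         'Asia': ['South Asia', 'Southeast Asia', 'East Asia', 'Central Asia'],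
--         'Middle East': ['Middle East'],
--         'Europe': ['Europe'],
--         'Americas': ['North America', 'South America', 'Central America']
--     }
--
--     reverse = {sub: region for region, subs in region_mapping.items() for sub in subs}
--
--     labels = [reverse.get(conflict.get('region', ''), 'Other') for conflict in conflicts]
--
--     counts = {region: labels.count(region) for region in region_mapping}
--     if 'Other' in labels:
--         counts['Other'] = labels.count('Other')
--     return counts
-- ===== Notes on version B (the rewrite author's own statement) =====
-- stated objective: alternative
-- what changed: Replaces A's single mutating pass (nested for/else scan updating a counts dict per conflict) by staged passes: a reverse sub-to-region dict maps each conflict to a label list, and the result is then assembled by counting each region's label in that list, with 'Other' added only when it occurs.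
import Mathlib
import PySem

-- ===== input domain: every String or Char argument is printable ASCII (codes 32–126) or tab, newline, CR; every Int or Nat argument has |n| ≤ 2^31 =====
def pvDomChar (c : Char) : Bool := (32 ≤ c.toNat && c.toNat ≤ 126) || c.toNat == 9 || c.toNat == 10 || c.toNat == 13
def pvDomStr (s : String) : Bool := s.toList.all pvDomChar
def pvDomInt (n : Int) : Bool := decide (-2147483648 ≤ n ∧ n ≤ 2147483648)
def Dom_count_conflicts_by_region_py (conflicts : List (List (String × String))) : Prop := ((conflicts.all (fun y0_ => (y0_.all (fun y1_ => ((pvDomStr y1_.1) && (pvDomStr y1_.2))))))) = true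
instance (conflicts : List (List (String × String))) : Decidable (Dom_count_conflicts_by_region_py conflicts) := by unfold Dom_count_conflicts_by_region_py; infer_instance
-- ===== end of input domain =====

-- B replaces A's single mutating pass (nested for/else scan per conflict) by staged passes:
-- map each conflict to a region label, then build the result by counting each label in that list
-- ('Other' appended only when it occurs); same asymptotics on this fixed mapping.

-- ===== PORT A =====
-- region_mapping, in insertion order
def pvRegionMapping : List (String × List String) :=
  [("Africa", ["Sub-Saharan Africa", "North Africa"]),
   ("Asia", ["South Asia", "Southeast Asia", "East Asia", "Central Asia"]),
   ("Middle East", ["Middle East"]),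
   ("Europe", ["Europe"]),
   ("Americas", ["North America", "South America", "Central America"])]

-- the inner 'for region, subregions in region_mapping.items(): if region_name in subregions: … break / else: …'
def pvScanMapping (name : String) : List (String × List String) → Option String
  | [] => none
  | (region, subregions) :: rest =>
      if subregions.contains name then some region else pvScanMapping name rest

def count_conflicts_by_region_py (conflicts : List (List (String × String))) : List (String × Int) :=
  let counts : PySem.Dict String Int :=
    PySem.Dict.ofList (pvRegionMapping.map (fun p => (p.1, 0)))
  let final := conflicts.foldl (fun counts conflict =>
    let region_name := (PySem.Dict.ofList conflict).getD "region" ""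
    match pvScanMapping region_name pvRegionMapping with
    | some region => counts.modify region 0 (· + 1)          -- counts[region] += 1
    | none => counts.insert "Other" (counts.getD "Other" 0 + 1)) counts
  final.items

-- ===== PORT B =====
-- reverse = {sub: region for region, subs … for sub …}
def pvReverse : PySem.Dict String String :=
  pvRegionMapping.foldl (fun d p => p.2.foldl (fun d sub => d.insert sub p.1) d) PySem.Dict.empty

-- labels = [reverse.get(conflict.get('region',''), 'Other') for conflict in conflicts]
def pvLabels (conflicts : List (List (String × String))) : List String :=
  conflicts.map (fun conflict =>
    pvReverse.getD ((PySem.Dict.ofList conflict).getD "region" "") "Other")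

def count_conflicts_by_region_py_alt (conflicts : List (List (String × String))) : List (String × Int) :=
  let labels := pvLabels conflicts
  -- counts = {region: labels.count(region) for region in region_mapping}
  let counts : PySem.Dict String Int :=
    PySem.Dict.ofList (pvRegionMapping.map (fun p => (p.1, (labels.count p.1 : Int))))
  -- if 'Other' in labels: counts['Other'] = labels.count('Other')
  let counts :=
    if labels.contains "Other" then counts.insert "Other" (labels.count "Other" : Int)
    else counts
  counts.items

-- ===== PRECONDITION & SPEC =====
def Spec_count_conflicts_by_region_py (conflicts : List (List (String × String))) (out : List (String × Int)) : Prop := out = count_conflicts_by_region_py_alt conflicts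
instance (conflicts : List (List (String × String))) (out : List (String × Int)) : Decidable (Spec_count_conflicts_by_region_py conflicts out) := by unfold Spec_count_conflicts_by_region_py; infer_instance

-- ===== CLAIM (what is proved, stated in full; the proofs are below) =====
def Claim_equal_count_conflicts_by_region_py : Prop := ∀ (conflicts : List (List (String × String))), Dom_count_conflicts_by_region_py conflicts → Spec_count_conflicts_by_region_py conflicts (count_conflicts_by_region_py conflicts)

-- ===== LEMMAS AND PROOFS =====

-- the per-label step A's loop body performs once the scan result is known
def pvStepL (d : PySem.Dict String Int) (lab : String) : PySem.Dict String Int :=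
  if lab = "Other" then d.insert "Other" (d.getD "Other" 0 + 1) else d.modify lab 0 (· + 1)

-- the six values a label can take
def pvSix : List String := ["Africa", "Asia", "Middle East", "Europe", "Americas", "Other"]

-- pvReverse as the literal dict it evaluates to
lemma reverse_eq : pvReverse = PySem.Dict.mk
    [("Sub-Saharan Africa","Africa"),("North Africa","Africa"),
     ("South Asia","Asia"),("Southeast Asia","Asia"),("East Asia","Asia"),("Central Asia","Asia"),
     ("Middle East","Middle East"),("Europe","Europe"),
     ("North America","Americas"),("South America","Americas"),("Central America","Americas")] := by rfl

-- A's first-match scan of the mapping is exactly a lookup in the reverse dict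
lemma scan_eq_reverse_get (name : String) :
    pvScanMapping name pvRegionMapping = pvReverse.get? name := by
  rw [reverse_eq]
  by_cases h1 : name = "Sub-Saharan Africa"; · subst h1; rfl
  by_cases h2 : name = "North Africa"; · subst h2; rfl
  by_cases h3 : name = "South Asia"; · subst h3; rfl
  by_cases h4 : name = "Southeast Asia"; · subst h4; rfl
  by_cases h5 : name = "East Asia"; · subst h5; rfl
  by_cases h6 : name = "Central Asia"; · subst h6; rfl
  by_cases h7 : name = "Middle East"; · subst h7; rfl
  by_cases h8 : name = "Europe"; · subst h8; rfl
  by_cases h9 : name = "North America"; · subst h9; rfl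
  by_cases h10 : name = "South America"; · subst h10; rfl
  by_cases h11 : name = "Central America"; · subst h11; rfl
  simp [pvScanMapping, pvRegionMapping, PySem.Dict.get?, h1, h2, h3, h4, h5, h6, h7, h8, h9, h10, h11,
        Ne.symm h1, Ne.symm h2, Ne.symm h3, Ne.symm h4, Ne.symm h5, Ne.symm h6, Ne.symm h7, Ne.symm h8,
        Ne.symm h9, Ne.symm h10, Ne.symm h11]

-- values of the reverse dict are the five region names
lemma reverse_get_mem (name r : String) (h : pvReverse.get? name = some r) :
    r ∈ ["Africa", "Asia", "Middle East", "Europe", "Americas"] := by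
  rw [reverse_eq] at h
  by_cases h1 : name = "Sub-Saharan Africa"; · subst h1; simp_all [PySem.Dict.get?]
  by_cases h2 : name = "North Africa"; · subst h2; simp_all [PySem.Dict.get?]
  by_cases h3 : name = "South Asia"; · subst h3; simp_all [PySem.Dict.get?]
  by_cases h4 : name = "Southeast Asia"; · subst h4; simp_all [PySem.Dict.get?]
  by_cases h5 : name = "East Asia"; · subst h5; simp_all [PySem.Dict.get?]
  by_cases h6 : name = "Central Asia"; · subst h6; simp_all [PySem.Dict.get?]
  by_cases h7 : name = "Middle East"; · subst h7; simp_all [PySem.Dict.get?]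
  by_cases h8 : name = "Europe"; · subst h8; simp_all [PySem.Dict.get?]
  by_cases h9 : name = "North America"; · subst h9; simp_all [PySem.Dict.get?]
  by_cases h10 : name = "South America"; · subst h10; simp_all [PySem.Dict.get?]
  by_cases h11 : name = "Central America"; · subst h11; simp_all [PySem.Dict.get?]
  simp [PySem.Dict.get?, Ne.symm h1, Ne.symm h2, Ne.symm h3, Ne.symm h4, Ne.symm h5, Ne.symm h6,
        Ne.symm h7, Ne.symm h8, Ne.symm h9, Ne.symm h10, Ne.symm h11] at h

lemma label_mem_six (name : String) : pvReverse.getD name "Other" ∈ pvSix := by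
  rw [PySem.Dict.getD_eq_get?_getD]
  cases h : pvReverse.get? name with
  | none => simp [pvSix]
  | some r =>
      have := reverse_get_mem name r h
      simp [pvSix] at this ⊢
      tauto

-- A's loop body equals pvStepL applied to the label B computes
lemma stepA_eq_stepL (name : String) (d : PySem.Dict String Int) :
    (match pvScanMapping name pvRegionMapping with
     | some region => d.modify region 0 (· + 1)
     | none => d.insert "Other" (d.getD "Other" 0 + 1))
    = pvStepL d (pvReverse.getD name "Other") := by
  rw [scan_eq_reverse_get]
  cases h : pvReverse.get? name with
  | none =>
      have hgd : pvReverse.getD name "Other" = "Other" := PySem.Dict.getD_of_get?_eq_none _ "Other" h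
      simp [pvStepL, hgd]
  | some r =>
      have hgd : pvReverse.getD name "Other" = r := PySem.Dict.getD_of_get?_eq_some _ "Other" h
      have hr := reverse_get_mem name r h
      have hne : r ≠ "Other" := by simp at hr; rcases hr with h'|h'|h'|h'|h' <;> simp [h']
      simp [pvStepL, hgd, hne]

-- characterisation of the fold of pvStepL over any list of the six labels
lemma fold_char (l : List String) (h : ∀ x ∈ l, x ∈ pvSix) :
    l.foldl pvStepL (PySem.Dict.ofList (pvRegionMapping.map (fun p => (p.1, (0 : Int)))))
    = PySem.Dict.mk ((pvRegionMapping.map (fun p => (p.1, (l.count p.1 : Int))))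
        ++ (if l.contains "Other" then [("Other", (l.count "Other" : Int))] else [])) := by
  induction l using List.reverseRecOn with
  | nil => decide
  | append_singleton l x ih =>
      have hl : ∀ y ∈ l, y ∈ pvSix := fun y hy => h y (List.mem_append_left _ hy)
      have hx : x ∈ pvSix := h x (by simp)
      rw [List.foldl_append, List.foldl_cons, List.foldl_nil, ih hl]
      simp only [pvSix, List.mem_cons, List.not_mem_nil, or_false] at hx
      rcases hx with hx|hx|hx|hx|hx|hx <;> subst hx <;>
        by_cases ho : "Other" ∈ l <;>
        simp_all [pvStepL, pvRegionMapping, PySem.Dict.modify, PySem.Dict.insert,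
                  PySem.Dict.getD, PySem.Dict.get?, PySem.Dict.contains,
                  List.count_append, List.count_cons,
                  List.mem_append, List.count_eq_zero]

-- Dict.ofList over the five distinct region keys is the literal list
lemma ofList_five (v1 v2 v3 v4 v5 : Int) :
    PySem.Dict.ofList [("Africa", v1), ("Asia", v2), ("Middle East", v3), ("Europe", v4), ("Americas", v5)]
    = PySem.Dict.mk [("Africa", v1), ("Asia", v2), ("Middle East", v3), ("Europe", v4), ("Americas", v5)] := by
  simp [PySem.Dict.ofList, PySem.Dict.update, PySem.Dict.empty, PySem.Dict.insert, PySem.Dict.contains]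

-- ===== VERDICT (by name: the statement is the Claim_ definition above) =====
theorem count_conflicts_by_region_py_spec : Claim_equal_count_conflicts_by_region_py := by
  intro conflicts _
  unfold Spec_count_conflicts_by_region_py count_conflicts_by_region_py count_conflicts_by_region_py_alt
  dsimp only
  have hfold : conflicts.foldl (fun counts conflict =>
      match pvScanMapping ((PySem.Dict.ofList conflict).getD "region" "") pvRegionMapping with
      | some region => counts.modify region 0 (· + 1)
      | none => counts.insert "Other" (counts.getD "Other" 0 + 1))
      (PySem.Dict.ofList (pvRegionMapping.map (fun p => (p.1, (0 : Int)))))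
      = (pvLabels conflicts).foldl pvStepL
        (PySem.Dict.ofList (pvRegionMapping.map (fun p => (p.1, (0 : Int))))) := by
    rw [pvLabels, List.foldl_map]
    apply PySem.List.foldl_congr_mem
    intro d c _
    exact stepA_eq_stepL _ d
  rw [hfold, fold_char _ (by intro x hx; simp [pvLabels] at hx; obtain ⟨c, _, rfl⟩ := hx; exact label_mem_six _)]
  by_cases ho : "Other" ∈ pvLabels conflicts <;>
    simp [ho, pvRegionMapping, ofList_five, PySem.Dict.insert, PySem.Dict.contains]
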